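-- pv_equiv track=rewrite | github.com/DestiShell/Sekynda.py-Project-s | BrainFuck TO Python.py (idk).py | python_to_brainfuck
-- ===== SOURCE A (Python) =====
-- def python_to_brainfuck(text: str) -> str:
--     bf_code = []
--     previous_value = 0
--
--     for char in text:
--         ascii_value = ord(char)
--         diff = ascii_value - previous_value
--
--         if diff > 0:
--             bf_code.append('+' * diff)
--         elif diff < 0:
--             bf_code.append('-' * abs(diff))
--
--         bf_code.append('.')
--         previous_value = ascii_value
--
--     return ''.join(bf_code)
-- ===== SOURCE B (Python) =====
-- def python_to_brainfuck(text: str) -> str: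
--     # Simulate the Brainfuck data cell: step it one unit at a time toward
--     # each character's code, emitting one output character per step.
--     out = []
--     cell = 0
--     for ch in text:
--         target = ord(ch)
--         while cell < target:
--             out.append('+')
--             cell += 1
--         while cell > target:
--             out.append('-')
--             cell -= 1
--         out.append('.')
--     return ''.join(out)
-- ===== Notes on version B (the rewrite author's own statement) =====
-- stated objective: alternative
-- what changed: B abandons A's arithmetic delta computation with string multiplication ('+'*diff) and instead simulates the Brainfuck data cell as a unary state machine, stepping the cell one unit at a time in while-loops and emitting a single output character per step.
import Mathlib
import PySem

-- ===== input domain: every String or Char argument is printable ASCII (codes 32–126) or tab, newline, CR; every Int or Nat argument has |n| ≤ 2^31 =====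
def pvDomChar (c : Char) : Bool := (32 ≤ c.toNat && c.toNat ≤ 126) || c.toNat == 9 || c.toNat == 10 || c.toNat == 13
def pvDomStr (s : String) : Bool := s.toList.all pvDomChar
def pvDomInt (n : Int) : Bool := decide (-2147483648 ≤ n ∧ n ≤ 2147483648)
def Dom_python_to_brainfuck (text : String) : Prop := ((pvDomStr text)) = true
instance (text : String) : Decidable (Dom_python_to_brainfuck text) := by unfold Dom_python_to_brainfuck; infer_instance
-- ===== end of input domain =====

-- B replaces A's arithmetic-delta/string-multiplication encoder with a unary state machine
-- that steps the simulated Brainfuck cell one unit per emitted character (alternative, same cost).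

-- ===== PORT A =====
def python_to_brainfuck (text : String) : String :=
  let r := text.toList.foldl (fun (st : List String × Int) c =>
    let a : Int := c.toNat
    let d := a - st.2
    let bf :=
      if d > 0 then st.1 ++ [String.ofList (List.replicate d.toNat '+')]
      else if d < 0 then st.1 ++ [String.ofList (List.replicate (-d).toNat '-')]
      else st.1
    (bf ++ ["."], a)) ([], 0)
  String.join r.1

-- ===== PORT B =====
-- 'while cell < target: emit '+'; cell += 1' as structural recursion on the gap
def bfUp (cell target : Int) : List Char :=
  if cell < target then '+' :: bfUp (cell + 1) target else []
termination_by (target - cell).toNat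
decreasing_by omega

-- 'while cell > target: emit '-'; cell -= 1'
def bfDown (cell target : Int) : List Char :=
  if target < cell then '-' :: bfDown (cell - 1) target else []
termination_by (cell - target).toNat
decreasing_by omega

def python_to_brainfuck_alt (text : String) : String :=
  let r := text.toList.foldl (fun (st : List Char × Int) c =>
    let t : Int := c.toNat
    (st.1 ++ bfUp st.2 t ++ bfDown st.2 t ++ ['.'], t)) ([], 0)
  String.ofList r.1

-- ===== PRECONDITION & SPEC =====
def Spec_python_to_brainfuck (text : String) (out : String) : Prop := out = python_to_brainfuck_alt text
instance (text : String) (out : String) : Decidable (Spec_python_to_brainfuck text out) := by unfold Spec_python_to_brainfuck; infer_instance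

-- ===== CLAIM =====
def Claim_equal_python_to_brainfuck : Prop := ∀ (text : String), Dom_python_to_brainfuck text → Spec_python_to_brainfuck text (python_to_brainfuck text)

-- ===== LEMMAS AND PROOFS =====
theorem bfUp_eq (cell target : Int) : bfUp cell target = List.replicate (target - cell).toNat '+' := by
  generalize h : (target - cell).toNat = n
  induction n generalizing cell with
  | zero => rw [bfUp]; simp; omega
  | succ k ih =>
    have hc : cell < target := by omega
    rw [bfUp, if_pos hc, ih (cell + 1) (by omega), List.replicate_succ]

theorem bfDown_eq (cell target : Int) : bfDown cell target = List.replicate (cell - target).toNat '-' := by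
  generalize h : (cell - target).toNat = n
  induction n generalizing cell with
  | zero => rw [bfDown]; simp; omega
  | succ k ih =>
    have hc : target < cell := by omega
    rw [bfDown, if_pos hc, ih (cell - 1) (by omega), List.replicate_succ]

theorem strFoldl_shift (s : String) (l : List String) :
    List.foldl (fun r t => r ++ t) s l = s ++ List.foldl (fun r t => r ++ t) "" l := by
  induction l generalizing s with
  | nil => simp
  | cons a l ih =>
    simp only [List.foldl_cons]
    rw [ih (s ++ a), ih ("" ++ a)]
    simp [String.append_assoc]

theorem strJoin_cons (a : String) (l : List String) :
    String.join (a :: l) = a ++ String.join l := by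
  simp only [String.join, List.foldl_cons]
  rw [strFoldl_shift]
  simp

theorem strJoin_nil : String.join ([] : List String) = "" := rfl

theorem strJoin_append (l1 l2 : List String) :
    String.join (l1 ++ l2) = String.join l1 ++ String.join l2 := by
  induction l1 with
  | nil => simp [String.join]
  | cons a t ih => simp [strJoin_cons, ih, String.append_assoc]

theorem bf_loop_eq (l : List Char) (p : Int) (accA : List String) (accB : List Char)
    (h : String.join accA = String.ofList accB) :
    String.join ((l.foldl (fun (st : List String × Int) c =>
      let a : Int := c.toNat
      let d := a - st.2
      let bf :=
        if d > 0 then st.1 ++ [String.ofList (List.replicate d.toNat '+')]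
        else if d < 0 then st.1 ++ [String.ofList (List.replicate (-d).toNat '-')]
        else st.1
      (bf ++ ["."], a)) (accA, p)).1)
    = String.ofList ((l.foldl (fun (st : List Char × Int) c =>
      let t : Int := c.toNat
      (st.1 ++ bfUp st.2 t ++ bfDown st.2 t ++ ['.'], t)) (accB, p)).1) := by
  induction l generalizing p accA accB with
  | nil => simpa using h
  | cons c t ih =>
    simp only [List.foldl_cons]
    apply ih
    rw [bfUp_eq, bfDown_eq]
    set a : Int := (c.toNat : Int) with ha
    by_cases h1 : a - p > 0
    · have hlt : p < a := by omega
      have e1 : (p - a).toNat = 0 := by omega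
      simp [hlt, e1, strJoin_append, strJoin_cons, strJoin_nil,
        String.ofList_append, h]
    · by_cases h2 : a - p < 0
      · have hlt : a < p := by omega
        have hnlt : ¬ p < a := by omega
        have e1 : (a - p).toNat = 0 := by omega
        have e3 : -(a - p) = p - a := by ring
        simp [hlt, hnlt, e1, e3, strJoin_append, strJoin_cons, strJoin_nil,
          String.ofList_append, h]
      · have hn1 : ¬ p < a := by omega
        have hn2 : ¬ a < p := by omega
        have e1 : (a - p).toNat = 0 := by omega
        have e2 : (p - a).toNat = 0 := by omega
        simp [hn1, hn2, e1, e2, strJoin_append, strJoin_cons, strJoin_nil,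
          String.ofList_append, h]

-- ===== VERDICT =====
theorem python_to_brainfuck_spec : Claim_equal_python_to_brainfuck := by
  intro text _
  unfold Spec_python_to_brainfuck python_to_brainfuck python_to_brainfuck_alt
  exact bf_loop_eq text.toList 0 [] [] (by simp [String.join])
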